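-- pv_equiv track=rewrite | github.com/btezzxxt/lintcode-python | 818 subset with target.py | subsetWithTarget
-- ===== SOURCE A (Python) =====
-- def subsetWithTarget(nums, target):
--     # Write you code here
--     nums.sort()
--     total = 0
--     for i in range(len(nums)):
--         end = i
--         for j in range(i + 1, len(nums)):
--             if nums[i] + nums[j] < target:
--                 end = j
--                 continue
--             else:
--                 break
--         if nums[i] + nums[end] < target:
--             total += pow(2, end - i)
--     return total
-- ===== SOURCE B (Python) =====
-- def subsetWithTarget(nums, target):
--     # Sort, then per-i binary search for the largest valid partner index
--     # (O(n log n) vs A's O(n^2) inner linear scan). Sorts nums in place like A.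
--     nums.sort()
--     n = len(nums)
--     total = 0
--     for i in range(n):
--         lo, hi, j = i, n - 1, i - 1
--         while lo <= hi:
--             mid = (lo + hi) // 2
--             if nums[i] + nums[mid] < target:
--                 j = mid
--                 lo = mid + 1
--             else:
--                 hi = mid - 1
--         if j >= i:
--             total += 1 << (j - i)
--     return total
-- ===== Notes on version B (the rewrite author's own statement) =====
-- stated objective: faster
-- what changed: A's inner linear scan for the last valid partner index is replaced by a binary search over the sorted list, turning the per-element cost from linear to logarithmic.
import Mathlib
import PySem

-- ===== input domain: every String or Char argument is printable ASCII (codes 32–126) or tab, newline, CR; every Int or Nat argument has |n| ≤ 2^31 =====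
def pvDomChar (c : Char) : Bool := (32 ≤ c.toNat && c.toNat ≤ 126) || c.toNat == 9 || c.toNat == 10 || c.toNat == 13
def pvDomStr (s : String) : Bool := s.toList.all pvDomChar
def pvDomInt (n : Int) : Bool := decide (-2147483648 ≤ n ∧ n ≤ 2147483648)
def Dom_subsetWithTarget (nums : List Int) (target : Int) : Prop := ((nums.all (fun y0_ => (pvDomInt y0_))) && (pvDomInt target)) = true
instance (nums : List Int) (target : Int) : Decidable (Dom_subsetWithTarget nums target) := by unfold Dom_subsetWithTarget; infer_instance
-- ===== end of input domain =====

-- B replaces A's inner linear scan by a binary search for the largest valid partner index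
-- (objective: faster). Equivalence is about the RETURN value; both Pythons sort nums in place.

-- ===== PORT A =====
-- inner 'for j in range(i+1, len(nums)): if …: end = j; continue; else: break'
def scanA (ys : List Int) (target xi : Int) : List Int → Int → Int
  | [], e => e
  | j :: rest, e =>
      if xi + PySem.List.pyGetD ys j 0 < target then scanA ys target xi rest j
      else e

def subsetWithTarget (nums : List Int) (target : Int) : Int :=
  let ys := PySem.List.sorted nums (fun x => x) false
  let n : Int := PySem.List.len ys
  (PySem.List.pyRange 0 n 1).foldl (fun total i =>
    let e := scanA ys target (PySem.List.pyGetD ys i 0) (PySem.List.pyRange (i + 1) n 1) i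
    -- pow(2, end - i): end - i ≥ 0 always holds here, so 2 ^ (end-i).toNat is exact
    if PySem.List.pyGetD ys i 0 + PySem.List.pyGetD ys e 0 < target
    then total + 2 ^ (e - i).toNat else total) 0

-- ===== PORT B =====
-- 'while lo <= hi: mid = (lo+hi)//2; …'
def bsB (ys : List Int) (target xi : Int) (lo hi j : Int) : Int :=
  if h : lo ≤ hi then
    let mid := PySem.Int.floordiv (lo + hi) 2
    if xi + PySem.List.pyGetD ys mid 0 < target then bsB ys target xi (mid + 1) hi mid
    else bsB ys target xi lo (mid - 1) j
  else j
termination_by (hi + 1 - lo).toNat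
decreasing_by
  · have := PySem.Int.floordiv_two_mid_bounds h; omega
  · have := PySem.Int.floordiv_two_mid_bounds h; omega

def subsetWithTarget_alt (nums : List Int) (target : Int) : Int :=
  let ys := PySem.List.sorted nums (fun x => x) false
  let n : Int := PySem.List.len ys
  (PySem.List.pyRange 0 n 1).foldl (fun total i =>
    let j := bsB ys target (PySem.List.pyGetD ys i 0) i (n - 1) (i - 1)
    -- 1 << (j - i): j - i ≥ 0 whenever this branch is taken, so 2 ^ (j-i).toNat is exact
    if i ≤ j then total + 2 ^ (j - i).toNat else total) 0

-- ===== PRECONDITION & SPEC =====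
def Spec_subsetWithTarget (nums : List Int) (target : Int) (out : Int) : Prop := out = subsetWithTarget_alt nums target
instance (nums : List Int) (target : Int) (out : Int) : Decidable (Spec_subsetWithTarget nums target out) := by unfold Spec_subsetWithTarget; infer_instance

-- ===== CLAIM (what is proved, stated in full; the proofs are below) =====
def Claim_equal_subsetWithTarget : Prop := ∀ (nums : List Int) (target : Int), Dom_subsetWithTarget nums target → Spec_subsetWithTarget nums target (subsetWithTarget nums target)

-- ===== LEMMAS AND PROOFS =====

-- B's binary search, on a region where the predicate is 'm < t', returns the clamp of t-1.
theorem bsB_spec (ys : List Int) (target xi : Int) :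
    ∀ (k : Nat) (lo hi j t : Int), (hi + 1 - lo).toNat ≤ k →
    (∀ m : Int, lo ≤ m → m ≤ hi → (xi + PySem.List.pyGetD ys m 0 < target ↔ m < t)) →
    bsB ys target xi lo hi j =
      if lo ≤ t - 1 ∧ lo ≤ hi then min hi (t - 1) else j := by
  intro k
  induction k with
  | zero =>
      intro lo hi j t hk ht
      rw [bsB, dif_neg (by omega)]
      simp only [min_def]; split_ifs <;> omega
  | succ k ih =>
      intro lo hi j t hk ht
      by_cases h : lo ≤ hi
      · have hb := PySem.Int.floordiv_two_mid_bounds h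
        rw [bsB]
        simp only [h, dite_true, and_true]
        by_cases hc : xi + PySem.List.pyGetD ys (PySem.Int.floordiv (lo + hi) 2) 0 < target
        · rw [if_pos hc]
          have hmt : PySem.Int.floordiv (lo + hi) 2 < t := (ht _ hb.1 hb.2).mp hc
          rw [ih (PySem.Int.floordiv (lo + hi) 2 + 1) hi (PySem.Int.floordiv (lo + hi) 2) t (by omega) (fun m h1 h2 => ht m (by omega) h2)]
          simp only [min_def]
          split_ifs <;> omega
        · rw [if_neg hc]
          have hmt : ¬ PySem.Int.floordiv (lo + hi) 2 < t :=
            fun hlt => hc ((ht _ hb.1 hb.2).mpr hlt)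
          rw [ih lo (PySem.Int.floordiv (lo + hi) 2 - 1) j t (by omega) (fun m h1 h2 => ht m h1 (by omega))]
          simp only [min_def]
          split_ifs <;> omega
      · rw [bsB, dif_neg h]
        simp only [min_def]; split_ifs <;> omega

-- A's inner scan over range(a, n) on such a region returns the same clamp (or its initial e).
theorem scanA_spec (ys : List Int) (target xi n : Int) :
    ∀ (k : Nat) (a e t : Int), k = (n - a).toNat →
    (∀ m : Int, a ≤ m → m < n → (xi + PySem.List.pyGetD ys m 0 < target ↔ m < t)) →
    scanA ys target xi (PySem.List.pyRange a n 1) e =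
      if a ≤ t - 1 ∧ a ≤ n - 1 then min (n - 1) (t - 1) else e := by
  intro k
  induction k with
  | zero =>
      intro a e t hk ht
      rw [PySem.List.pyRange_one_eq_nil (by omega)]
      simp only [scanA]
      simp only [min_def]; split_ifs <;> omega
  | succ k ih =>
      intro a e t hk ht
      by_cases han : a < n
      · rw [PySem.List.pyRange_one_cons han]
        simp only [scanA]
        by_cases hc : xi + PySem.List.pyGetD ys a 0 < target
        · rw [if_pos hc]
          have hat : a < t := (ht a le_rfl han).mp hc
          rw [ih (a + 1) a t (by omega) (fun m h1 h2 => ht m (by omega) h2)]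
          simp only [min_def]
          split_ifs <;> omega
        · rw [if_neg hc]
          have hat : ¬ a < t := fun hlt => hc ((ht a le_rfl han).mpr hlt)
          simp only [min_def]; split_ifs <;> omega
      · rw [PySem.List.pyRange_one_eq_nil (by omega)]
        simp only [scanA]
        simp only [min_def]; split_ifs <;> omega

-- On the sorted list the predicate 'xi + ys[m] < target' is a downward-closed condition on m:
-- there is a threshold t with a ≤ t ≤ n such that it holds exactly for m < t.
theorem exists_threshold (ys : List Int) (target xi : Int)
    (hmono : ∀ p q : Int, 0 ≤ p → p ≤ q → q < (ys.length : Int) →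
      PySem.List.pyGetD ys p 0 ≤ PySem.List.pyGetD ys q 0) :
    ∀ (k : Nat) (a : Int), 0 ≤ a → a ≤ (ys.length : Int) → k = ((ys.length : Int) - a).toNat →
    ∃ t : Int, a ≤ t ∧ t ≤ (ys.length : Int) ∧
      ∀ m : Int, a ≤ m → m < (ys.length : Int) →
        (xi + PySem.List.pyGetD ys m 0 < target ↔ m < t) := by
  intro k
  induction k with
  | zero =>
      intro a ha0 han hk
      exact ⟨a, le_rfl, by omega, fun m h1 h2 => by omega⟩
  | succ k ih =>
      intro a ha0 han hk
      have halt : a < (ys.length : Int) := by omega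
      by_cases hc : xi + PySem.List.pyGetD ys a 0 < target
      · obtain ⟨t, h1, h2, h3⟩ := ih (a + 1) (by omega) (by omega) (by omega)
        refine ⟨t, by omega, h2, fun m hm1 hm2 => ?_⟩
        by_cases hma : m = a
        · subst hma; exact ⟨fun _ => by omega, fun _ => hc⟩
        · exact h3 m (by omega) hm2
      · refine ⟨a, le_rfl, by omega, fun m hm1 hm2 => ?_⟩
        have := hmono a m ha0 hm1 hm2
        constructor
        · intro hlt; omega
        · omega

-- The sorted list is index-monotone, in pyGetD form.
theorem sorted_mono (nums : List Int) :
    ∀ p q : Int, 0 ≤ p → p ≤ q →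
      q < ((PySem.List.sorted nums (fun x => x) false).length : Int) →
      PySem.List.pyGetD (PySem.List.sorted nums (fun x => x) false) p 0 ≤
      PySem.List.pyGetD (PySem.List.sorted nums (fun x => x) false) q 0 := by
  intro p q hp hpq hq
  rw [PySem.List.pyGetD_eq_getElem _ _ hp (by omega),
      PySem.List.pyGetD_eq_getElem _ _ (by omega) hq]
  exact PySem.List.sorted_id_getElem_mono nums (by omega) (by omega)

-- ===== VERDICT (by name: the statement is the Claim_ definition above) =====
theorem subsetWithTarget_spec : Claim_equal_subsetWithTarget := by
  intro nums target _
  unfold Spec_subsetWithTarget subsetWithTarget subsetWithTarget_alt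
  simp only [PySem.List.len_eq]
  apply PySem.List.foldl_congr_mem
  intro acc i hi
  rw [PySem.List.mem_pyRange_one] at hi
  set ys := PySem.List.sorted nums (fun x => x) false with hys
  set xi := PySem.List.pyGetD ys i 0 with hxi
  obtain ⟨t, ht1, ht2, ht3⟩ :=
    exists_threshold ys target xi (sorted_mono nums)
      ((ys.length : Int) - i).toNat i (by omega) (by omega) rfl
  rw [scanA_spec ys target xi (ys.length : Int) ((ys.length : Int) - (i + 1)).toNat
        (i + 1) i t rfl (fun m h1 h2 => ht3 m (by omega) h2),
      bsB_spec ys target xi ((ys.length : Int) - i).toNat i ((ys.length : Int) - 1) (i - 1) t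
        (by omega) (fun m h1 h2 => ht3 m h1 (by omega))]
  by_cases hit : i < t
  · -- there is a valid partner: both sides add 2 ^ (min (n-1) (t-1) - i)
    have hC2 : i ≤ t - 1 ∧ i ≤ (ys.length : Int) - 1 := ⟨by omega, by omega⟩
    rw [if_pos hC2]
    have hile : i ≤ min ((ys.length : Int) - 1) (t - 1) := le_min (by omega) (by omega)
    rw [if_pos hile]
    by_cases hC1 : i + 1 ≤ t - 1 ∧ i + 1 ≤ (ys.length : Int) - 1
    · rw [if_pos hC1]
      have hlt : min ((ys.length : Int) - 1) (t - 1) < t :=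
        lt_of_le_of_lt (min_le_right _ _) (by omega)
      have hltn : min ((ys.length : Int) - 1) (t - 1) < (ys.length : Int) :=
        lt_of_le_of_lt (min_le_left _ _) (by omega)
      rw [if_pos ((ht3 _ hile hltn).mpr hlt)]
    · rw [if_neg hC1]
      rw [if_pos ((ht3 i le_rfl (by omega)).mpr hit)]
      have hmin : min ((ys.length : Int) - 1) (t - 1) = i :=
        le_antisymm (by rcases not_and_or.mp hC1 with h | h
                        · exact le_trans (min_le_right _ _) (by omega)
                        · exact le_trans (min_le_left _ _) (by omega)) hile
      rw [hmin]
  · -- t = i: no valid partner at all, both sides add nothing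
    have hC1 : ¬ (i + 1 ≤ t - 1 ∧ i + 1 ≤ (ys.length : Int) - 1) := by omega
    have hC2 : ¬ (i ≤ t - 1 ∧ i ≤ (ys.length : Int) - 1) := by omega
    rw [if_neg hC1, if_neg hC2]
    have hfalse : ¬ xi + PySem.List.pyGetD ys i 0 < target := by
      intro hc; have := (ht3 i le_rfl (by omega)).mp hc; omega
    rw [if_neg hfalse, if_neg (show ¬ i ≤ i - 1 by omega)]
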